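-- pv_equiv track=rewrite | github.com/KiranJana/AI_GEN | backend.py | find_matching_mesh_names
-- ===== SOURCE A (Python) =====
-- def find_matching_mesh_names(asset_name, available_meshes):
--     """Find meshes that match the asset name using multiple strategies."""
--     asset_name_lower = asset_name.lower()
--     matches = []
--
--     # Strategy 1: Exact match
--     for mesh_name in available_meshes:
--         if mesh_name == asset_name:
--             matches.insert(0, mesh_name)  # Prioritize exact matches
--
--     # Strategy 2: Contains asset name
--     for mesh_name in available_meshes:
--         mesh_lower = mesh_name.lower()
--         if asset_name_lower in mesh_lower and mesh_name not in matches: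
--             matches.append(mesh_name)
--
--     # Strategy 3: Asset name contains mesh name
--     for mesh_name in available_meshes:
--         mesh_lower = mesh_name.lower()
--         if mesh_lower in asset_name_lower and mesh_name not in matches:
--             matches.append(mesh_name)
--
--     # Strategy 4: Prefix matching with DATA_ handling
--     for mesh_name in available_meshes:
--         # Handle DATA_ prefix common in Blender exports
--         clean_mesh = mesh_name.replace('DATA_', '').lower()
--         if clean_mesh == asset_name_lower and mesh_name not in matches:
--             matches.append(mesh_name)
--
--     return matches
-- ===== SOURCE B (Python) =====
-- def find_matching_mesh_names(asset_name, available_meshes):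
--     """Find meshes that match the asset name using multiple strategies.
--
--     Single pass: classify each mesh into the first matching bucket
--     (exact / contains / contained / DATA_-stripped equality), deduping
--     the non-exact buckets with one shared `seen` set.
--     """
--     asset_name_lower = asset_name.lower()
--     exact, contains_b, contained_b, data_b = [], [], [], []
--     seen = set()
--     for mesh_name in available_meshes:
--         if mesh_name == asset_name:
--             exact.append(mesh_name)
--         elif mesh_name in seen:
--             continue
--         else:
--             mesh_lower = mesh_name.lower()
--             if asset_name_lower in mesh_lower:
--                 contains_b.append(mesh_name)
--                 seen.add(mesh_name)
--             elif mesh_lower in asset_name_lower: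
--                 contained_b.append(mesh_name)
--                 seen.add(mesh_name)
--             elif mesh_name.replace('DATA_', '').lower() == asset_name_lower:
--                 data_b.append(mesh_name)
--                 seen.add(mesh_name)
--     return list(reversed(exact)) + contains_b + contained_b + data_b
-- ===== Notes on version B (the rewrite author's own statement) =====
-- stated objective: faster
-- what changed: Replaces four sequential passes with O(n)-cost 'mesh not in matches' list scans by a single pass that classifies each mesh into the first of four ordered buckets via an elif chain, deduping with one shared hash set.
import Mathlib
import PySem

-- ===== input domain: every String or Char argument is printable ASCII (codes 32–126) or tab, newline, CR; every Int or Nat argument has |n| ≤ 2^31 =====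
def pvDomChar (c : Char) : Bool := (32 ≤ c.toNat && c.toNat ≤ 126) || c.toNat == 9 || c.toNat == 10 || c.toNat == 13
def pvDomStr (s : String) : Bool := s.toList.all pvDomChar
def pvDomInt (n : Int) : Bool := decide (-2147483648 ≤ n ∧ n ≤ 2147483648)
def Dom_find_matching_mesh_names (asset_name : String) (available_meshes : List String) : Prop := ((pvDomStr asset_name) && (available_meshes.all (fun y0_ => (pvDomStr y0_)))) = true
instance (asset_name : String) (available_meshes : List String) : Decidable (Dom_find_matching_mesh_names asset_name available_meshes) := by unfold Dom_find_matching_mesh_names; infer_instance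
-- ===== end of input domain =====

-- B replaces A's four passes (each with a linear 'mesh_name not in matches' scan) by a
-- single classifying pass with a shared seen-set; same return value, no mutation involved.

-- ===== PORT A =====
def find_matching_mesh_names (asset_name : String) (available_meshes : List String) : List String :=
  let asset_name_lower := PySem.Str.lower asset_name
  let matches1 := available_meshes.foldl (fun acc mesh_name =>
      if mesh_name == asset_name then mesh_name :: acc else acc) []
  let matches2 := available_meshes.foldl (fun acc mesh_name =>
      if PySem.Str.isIn asset_name_lower (PySem.Str.lower mesh_name) && !(acc.contains mesh_name)
      then acc ++ [mesh_name] else acc) matches1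
  let matches3 := available_meshes.foldl (fun acc mesh_name =>
      if PySem.Str.isIn (PySem.Str.lower mesh_name) asset_name_lower && !(acc.contains mesh_name)
      then acc ++ [mesh_name] else acc) matches2
  let matches4 := available_meshes.foldl (fun acc mesh_name =>
      if (PySem.Str.lower (PySem.Str.replace mesh_name "DATA_" "") == asset_name_lower) && !(acc.contains mesh_name)
      then acc ++ [mesh_name] else acc) matches3
  matches4

-- ===== PORT B =====
-- fold state: (exact, contains_b, contained_b, data_b, seen)
def pvBStep (asset_name al : String) :
    (List String × List String × List String × List String × PySem.Set String) → String →
    (List String × List String × List String × List String × PySem.Set String)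
  | (exact, b2, b3, b4, seen), mesh_name =>
    if mesh_name == asset_name then
      (exact ++ [mesh_name], b2, b3, b4, seen)
    else if PySem.Set.contains seen mesh_name then
      (exact, b2, b3, b4, seen)
    else if PySem.Str.isIn al (PySem.Str.lower mesh_name) then
      (exact, b2 ++ [mesh_name], b3, b4, PySem.Set.add seen mesh_name)
    else if PySem.Str.isIn (PySem.Str.lower mesh_name) al then
      (exact, b2, b3 ++ [mesh_name], b4, PySem.Set.add seen mesh_name)
    else if PySem.Str.lower (PySem.Str.replace mesh_name "DATA_" "") == al then
      (exact, b2, b3, b4 ++ [mesh_name], PySem.Set.add seen mesh_name)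
    else
      (exact, b2, b3, b4, seen)

def find_matching_mesh_names_alt (asset_name : String) (available_meshes : List String) : List String :=
  let al := PySem.Str.lower asset_name
  let st := available_meshes.foldl (pvBStep asset_name al)
      ([], [], [], [], PySem.Set.empty)
  st.1.reverse ++ st.2.1 ++ st.2.2.1 ++ st.2.2.2.1

-- ===== PRECONDITION & SPEC =====
def Spec_find_matching_mesh_names (asset_name : String) (available_meshes : List String) (out : List String) : Prop := out = find_matching_mesh_names_alt asset_name available_meshes
instance (asset_name : String) (available_meshes : List String) (out : List String) : Decidable (Spec_find_matching_mesh_names asset_name available_meshes out) := by unfold Spec_find_matching_mesh_names; infer_instance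

-- ===== CLAIM (what is proved, stated in full; the proofs are below) =====
def Claim_equal_find_matching_mesh_names : Prop := ∀ (asset_name : String) (available_meshes : List String), Dom_find_matching_mesh_names asset_name available_meshes → Spec_find_matching_mesh_names asset_name available_meshes (find_matching_mesh_names asset_name available_meshes)

-- ===== LEMMAS AND PROOFS =====

def foSeen (p : String → Bool) : List String → List String → List String
  | _, [] => []
  | seen, m :: rest =>
    if p m && !(seen.contains m) then m :: foSeen p (seen ++ [m]) rest
    else foSeen p seen rest

theorem pass1_eq (a : String) : ∀ (l : List String) (acc : List String),
    l.foldl (fun acc m => if m == a then m :: acc else acc) acc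
      = (l.filter (fun m => m == a)).reverse ++ acc := by
  intro l
  induction l with
  | nil => simp
  | cons m rest ih =>
    intro acc
    rw [List.foldl_cons, List.filter_cons]
    by_cases h : (m == a) = true
    · rw [if_pos h, if_pos h, ih]; simp
    · rw [if_neg h, if_neg h, ih]

theorem pass_eq (p : String → Bool) : ∀ (l init : List String),
    l.foldl (fun acc m => if p m && !(acc.contains m) then acc ++ [m] else acc) init
      = init ++ foSeen p init l := by
  intro l
  induction l with
  | nil => simp [foSeen]
  | cons m rest ih =>
    intro init
    rw [List.foldl_cons, foSeen]
    by_cases h : (p m && !(init.contains m)) = true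
    · rw [if_pos h, if_pos h, ih]; simp
    · rw [if_neg h, if_neg h, ih]

theorem mem_foSeen (p : String → Bool) : ∀ (l seen : List String) (x : String),
    x ∈ foSeen p seen l ↔ x ∈ l ∧ p x = true ∧ x ∉ seen := by
  intro l
  induction l with
  | nil => simp [foSeen]
  | cons m rest ih =>
    intro seen x
    rw [foSeen]
    by_cases h : (p m && !(seen.contains m)) = true
    · rw [if_pos h]
      simp only [Bool.and_eq_true, Bool.not_eq_true', List.contains_eq_mem,
        decide_eq_false_iff_not] at h
      by_cases hxm : x = m
      · subst hxm; simp [h]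
      · simp [ih, hxm]
    · rw [if_neg h]
      simp only [Bool.and_eq_true, Bool.not_eq_true', List.contains_eq_mem,
        decide_eq_false_iff_not, not_and] at h
      rw [ih]
      by_cases hxm : x = m
      · subst hxm
        constructor
        · rintro ⟨_, hp, hs⟩; exact ⟨by simp, hp, hs⟩
        · rintro ⟨_, hp, hs⟩
          exact absurd hs (h hp)
      · simp [hxm]

theorem foSeen_congr (p q : String → Bool) : ∀ (l s₁ s₂ : List String),
    (∀ x ∈ l, (p x && !(s₁.contains x)) = (q x && !(s₂.contains x))) →
    foSeen p s₁ l = foSeen q s₂ l := by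
  intro l
  induction l with
  | nil => intro _ _ _; rfl
  | cons m rest ih =>
    intro s₁ s₂ hyp
    rw [foSeen, foSeen, hyp m (by simp)]
    have hext : ∀ x ∈ rest, (p x && !((s₁ ++ [m]).contains x)) = (q x && !((s₂ ++ [m]).contains x)) := by
      intro x hx
      by_cases hxm : x = m
      · subst hxm; simp
      · simp only [List.contains_eq_mem, List.mem_append, List.mem_singleton, hxm, or_false]
        simpa using hyp x (by simp [hx])
    by_cases h : (q m && !(s₂.contains m)) = true
    · rw [if_pos h, if_pos h, ih _ _ hext]
    · rw [if_neg h, if_neg h, ih _ _ (fun x hx => hyp x (by simp [hx]))]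

theorem foSeen_seen_irrel (p : String → Bool) (l s : List String) (m : String)
    (h : p m = false) : foSeen p (s ++ [m]) l = foSeen p s l := by
  apply foSeen_congr
  intro x hx
  by_cases hxm : x = m
  · subst hxm; simp [h]
  · simp [List.contains_eq_mem, hxm]

theorem Bfold (a al : String) : ∀ (l : List String) (e b2 b3 b4 s : List String),
    l.foldl (pvBStep a al) (e, b2, b3, b4, s) =
      (e ++ l.filter (fun m => m == a),
       b2 ++ foSeen (fun m => !(m == a) && PySem.Str.isIn al (PySem.Str.lower m)) s l,
       b3 ++ foSeen (fun m => !(m == a) && !(PySem.Str.isIn al (PySem.Str.lower m)) && PySem.Str.isIn (PySem.Str.lower m) al) s l,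
       b4 ++ foSeen (fun m => !(m == a) && !(PySem.Str.isIn al (PySem.Str.lower m)) && !(PySem.Str.isIn (PySem.Str.lower m) al) && (PySem.Str.lower (PySem.Str.replace m "DATA_" "") == al)) s l,
       s ++ foSeen (fun m => !(m == a) && (PySem.Str.isIn al (PySem.Str.lower m) || PySem.Str.isIn (PySem.Str.lower m) al || (PySem.Str.lower (PySem.Str.replace m "DATA_" "") == al))) s l) := by
  intro l
  induction l with
  | nil => simp [foSeen]
  | cons m rest ih =>
    intro e b2 b3 b4 s
    rw [List.foldl_cons]
    by_cases he : m = a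
    · have hstep : pvBStep a al (e, b2, b3, b4, s) m = (e ++ [m], b2, b3, b4, s) := by
        simp [pvBStep, he]
      rw [hstep, ih]
      simp [foSeen, he]
    · by_cases hs : m ∈ s
      · have hstep : pvBStep a al (e, b2, b3, b4, s) m = (e, b2, b3, b4, s) := by
          simp [pvBStep, he, hs]
        rw [hstep, ih]
        simp [foSeen, he, hs, List.contains_eq_mem]
      · by_cases h2 : PySem.Chars.isIn al.toList (PySem.Chars.lower m.toList) = true
        · have hstep : pvBStep a al (e, b2, b3, b4, s) m = (e, b2 ++ [m], b3, b4, s ++ [m]) := by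
            simp [pvBStep, he, hs, h2, PySem.Set.add]
          rw [hstep, ih]
          rw [foSeen_seen_irrel (fun m => !(m == a) && !(PySem.Str.isIn al (PySem.Str.lower m)) && PySem.Str.isIn (PySem.Str.lower m) al) rest s m (by simp [h2]),
              foSeen_seen_irrel (fun m => !(m == a) && !(PySem.Str.isIn al (PySem.Str.lower m)) && !(PySem.Str.isIn (PySem.Str.lower m) al) && (PySem.Str.lower (PySem.Str.replace m "DATA_" "") == al)) rest s m (by simp [h2])]
          simp [foSeen, he, hs, h2, List.contains_eq_mem]
        · by_cases h3 : PySem.Chars.isIn (PySem.Chars.lower m.toList) al.toList = true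
          · have hstep : pvBStep a al (e, b2, b3, b4, s) m = (e, b2, b3 ++ [m], b4, s ++ [m]) := by
              simp [pvBStep, he, hs, h2, h3, PySem.Set.add]
            rw [hstep, ih]
            rw [foSeen_seen_irrel (fun m => !(m == a) && PySem.Str.isIn al (PySem.Str.lower m)) rest s m (by simp [h2]),
                foSeen_seen_irrel (fun m => !(m == a) && !(PySem.Str.isIn al (PySem.Str.lower m)) && !(PySem.Str.isIn (PySem.Str.lower m) al) && (PySem.Str.lower (PySem.Str.replace m "DATA_" "") == al)) rest s m (by simp [h3])]
            simp [foSeen, he, hs, h2, h3, List.contains_eq_mem]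
          · by_cases h4 : PySem.Str.lower (PySem.Str.replace m "DATA_" "") = al
            · have hstep : pvBStep a al (e, b2, b3, b4, s) m = (e, b2, b3, b4 ++ [m], s ++ [m]) := by
                simp [pvBStep, he, hs, h2, h3, h4, PySem.Set.add]
              rw [hstep, ih]
              rw [foSeen_seen_irrel (fun m => !(m == a) && PySem.Str.isIn al (PySem.Str.lower m)) rest s m (by simp [h2]),
                  foSeen_seen_irrel (fun m => !(m == a) && !(PySem.Str.isIn al (PySem.Str.lower m)) && PySem.Str.isIn (PySem.Str.lower m) al) rest s m (by simp [h3])]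
              simp [foSeen, he, hs, h2, h3, h4, List.contains_eq_mem]
            · have hstep : pvBStep a al (e, b2, b3, b4, s) m = (e, b2, b3, b4, s) := by
                simp [pvBStep, he, hs, h2, h3, h4]
              rw [hstep, ih]
              simp [foSeen, he, hs, h2, h3, h4, List.contains_eq_mem]

theorem mem_M1 (a : String) (L : List String) (x : String) (hx : x ∈ L) :
    x ∈ (L.filter (fun m => m == a)).reverse ↔ x = a := by
  simp [List.mem_filter, hx]

theorem mem_M2 (a : String) (alc : List Char) (L : List String) (x : String) (hx : x ∈ L) :
    x ∈ (L.filter (fun m => m == a)).reverse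
        ++ foSeen (fun m => PySem.Chars.isIn alc (PySem.Chars.lower m.toList)) ((L.filter (fun m => m == a)).reverse) L
      ↔ x = a ∨ PySem.Chars.isIn alc (PySem.Chars.lower x.toList) = true := by
  rw [List.mem_append, mem_foSeen, mem_M1 a L x hx]
  by_cases h : x = a
  · simp [h, h ▸ hx]
  · simp [h, hx]

theorem mem_M3 (a : String) (alc : List Char) (L : List String) (x : String) (hx : x ∈ L) :
    x ∈ ((L.filter (fun m => m == a)).reverse
        ++ foSeen (fun m => PySem.Chars.isIn alc (PySem.Chars.lower m.toList)) ((L.filter (fun m => m == a)).reverse) L)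
        ++ foSeen (fun m => PySem.Chars.isIn (PySem.Chars.lower m.toList) alc)
             ((L.filter (fun m => m == a)).reverse
               ++ foSeen (fun m => PySem.Chars.isIn alc (PySem.Chars.lower m.toList)) ((L.filter (fun m => m == a)).reverse) L) L
      ↔ x = a ∨ PySem.Chars.isIn alc (PySem.Chars.lower x.toList) = true ∨ PySem.Chars.isIn (PySem.Chars.lower x.toList) alc = true := by
  rw [List.mem_append, mem_foSeen, mem_M2 a alc L x hx]
  by_cases h : x = a
  · simp [h, h ▸ hx]
  · by_cases h2 : PySem.Chars.isIn alc (PySem.Chars.lower x.toList) = true <;>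
      simp [h, h2, hx] <;> tauto

theorem conv2 (a : String) (alc : List Char) (L : List String) :
    foSeen (fun m => PySem.Chars.isIn alc (PySem.Chars.lower m.toList)) ((L.filter (fun m => m == a)).reverse) L
      = foSeen (fun m => !(m == a) && PySem.Chars.isIn alc (PySem.Chars.lower m.toList)) [] L := by
  apply foSeen_congr
  intro x hx
  by_cases h : x = a
  · simp [List.contains_eq_mem, mem_M1 a L x hx, h, h ▸ hx]
  · simp [List.contains_eq_mem, mem_M1 a L x hx, h]

theorem conv3 (a : String) (alc : List Char) (L : List String) :
    foSeen (fun m => PySem.Chars.isIn (PySem.Chars.lower m.toList) alc)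
        ((L.filter (fun m => m == a)).reverse
          ++ foSeen (fun m => PySem.Chars.isIn alc (PySem.Chars.lower m.toList)) ((L.filter (fun m => m == a)).reverse) L) L
      = foSeen (fun m => !(m == a) && !(PySem.Chars.isIn alc (PySem.Chars.lower m.toList)) && PySem.Chars.isIn (PySem.Chars.lower m.toList) alc) [] L := by
  apply foSeen_congr
  intro x hx
  have hc : ((L.filter (fun m => m == a)).reverse
      ++ foSeen (fun m => PySem.Chars.isIn alc (PySem.Chars.lower m.toList)) ((L.filter (fun m => m == a)).reverse) L).contains x
      = (decide (x = a) || PySem.Chars.isIn alc (PySem.Chars.lower x.toList)) := by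
    rw [List.contains_eq_mem, decide_eq_decide.mpr (mem_M2 a alc L x hx)]
    all_goals first
    | infer_instance
    | simp
  rw [hc]
  by_cases h : x = a
  · simp [h]
  · have hb : (x == a) = false := by simp [h]
    simp [hb, h, Bool.and_comm]

theorem conv4 (a : String) (alc : List Char) (al : String) (L : List String) :
    foSeen (fun m => PySem.Str.lower (PySem.Str.replace m "DATA_" "") == al)
        (((L.filter (fun m => m == a)).reverse
          ++ foSeen (fun m => PySem.Chars.isIn alc (PySem.Chars.lower m.toList)) ((L.filter (fun m => m == a)).reverse) L)
          ++ foSeen (fun m => PySem.Chars.isIn (PySem.Chars.lower m.toList) alc)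
               ((L.filter (fun m => m == a)).reverse
                 ++ foSeen (fun m => PySem.Chars.isIn alc (PySem.Chars.lower m.toList)) ((L.filter (fun m => m == a)).reverse) L) L) L
      = foSeen (fun m => !(m == a) && !(PySem.Chars.isIn alc (PySem.Chars.lower m.toList)) && !(PySem.Chars.isIn (PySem.Chars.lower m.toList) alc) && (PySem.Str.lower (PySem.Str.replace m "DATA_" "") == al)) [] L := by
  apply foSeen_congr
  intro x hx
  have hc : (((L.filter (fun m => m == a)).reverse
      ++ foSeen (fun m => PySem.Chars.isIn alc (PySem.Chars.lower m.toList)) ((L.filter (fun m => m == a)).reverse) L)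
      ++ foSeen (fun m => PySem.Chars.isIn (PySem.Chars.lower m.toList) alc)
           ((L.filter (fun m => m == a)).reverse
             ++ foSeen (fun m => PySem.Chars.isIn alc (PySem.Chars.lower m.toList)) ((L.filter (fun m => m == a)).reverse) L) L).contains x
      = (decide (x = a) || PySem.Chars.isIn alc (PySem.Chars.lower x.toList) || PySem.Chars.isIn (PySem.Chars.lower x.toList) alc) := by
    rw [List.contains_eq_mem, decide_eq_decide.mpr (mem_M3 a alc L x hx)]
    all_goals first
    | infer_instance
    | simp [Bool.or_assoc]
  rw [hc]
  by_cases h : x = a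
  · simp [h]
  · have hb : (x == a) = false := by simp [h]
    simp [hb, h, Bool.and_comm, Bool.and_assoc]

-- ===== VERDICT (by name: the statement is the Claim_ definition above) =====
theorem find_matching_mesh_names_spec : Claim_equal_find_matching_mesh_names := by
  intro a L _
  unfold Spec_find_matching_mesh_names
  simp only [find_matching_mesh_names, find_matching_mesh_names_alt]
  rw [Bfold]
  simp only [pass1_eq, pass_eq, List.append_nil, List.nil_append,
    PySem.Str.isIn_eq, PySem.Str.toList_lower]
  rw [conv4 a (PySem.Chars.lower a.toList) (PySem.Str.lower a) L,
    conv3 a (PySem.Chars.lower a.toList) L, conv2 a (PySem.Chars.lower a.toList) L]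
  simp [List.append_assoc, PySem.Set.empty]
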